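-- pv_equiv track=rewrite | github.com/Alt3z/Python_various_projects | Тинька_экзамен_на_Python_разработчика/Цветы_Бориса/main.py | max_bouquet_cost
-- ===== SOURCE A (Python) =====
-- def max_bouquet_cost(budgets):
--     flower_costs = [2**i for i in range(101)]
--     results = []
--
--     for budget in budgets:
--         max_spent = -1
--         found = False
--
--         for i in range(len(flower_costs)):
--             if flower_costs[i] > budget:
--                 break
--             for j in range(i+1, len(flower_costs)):
--                 if flower_costs[i] + flower_costs[j] > budget:
--                     break
--                 for k in range(j+1, len(flower_costs)):
--                     total_cost = flower_costs[i] + flower_costs[j] + flower_costs[k]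
--                     if total_cost > budget:
--                         break
--                     max_spent = max(max_spent, total_cost)
--                     found = True
--         results.append(max_spent if found else -1)
--
--     return results
-- ===== SOURCE B (Python) =====
-- def max_bouquet_cost(budgets):
--     results = []
--     for budget in budgets:
--         if budget < 7:
--             results.append(-1)
--             continue
--         total = 0
--         need = 3
--         for e in range(min(100, budget.bit_length() - 1), -1, -1):
--             if need and e >= need - 1 and total + (1 << e) + ((1 << (need - 1)) - 1) <= budget:
--                 total += 1 << e
--                 need -= 1
--         results.append(total if need == 0 else -1)
--     return results
-- ===== Notes on version B (the rewrite author's own statement) =====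
-- stated objective: faster
-- what changed: A enumerates, per budget, every triple i<j<k of powers of two in a triple nested loop with breaks and keeps the max affordable sum; B does a single descending greedy pass over exponents from the budget's bit length down to 0, taking a power whenever it still fits together with a reserve for the remaining smaller picks, building the largest 3-set-bit number <= budget directly.
import Mathlib
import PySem

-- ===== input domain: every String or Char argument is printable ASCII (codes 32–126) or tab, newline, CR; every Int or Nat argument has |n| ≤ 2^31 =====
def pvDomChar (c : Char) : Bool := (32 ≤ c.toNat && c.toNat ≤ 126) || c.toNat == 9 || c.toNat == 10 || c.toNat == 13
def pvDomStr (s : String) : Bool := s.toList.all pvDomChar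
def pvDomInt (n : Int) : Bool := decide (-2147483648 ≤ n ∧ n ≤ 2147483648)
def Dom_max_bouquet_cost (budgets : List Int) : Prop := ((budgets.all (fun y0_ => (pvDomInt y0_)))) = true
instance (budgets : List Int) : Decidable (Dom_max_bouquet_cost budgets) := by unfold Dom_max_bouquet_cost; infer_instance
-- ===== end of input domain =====

-- B replaces A's per-budget enumeration of all triples of powers of 2 by a single
-- descending greedy pass that builds the largest 3-set-bit number ≤ budget (objective: faster).

-- ===== PORT A =====
-- flower_costs = [2**i for i in range(101)]
def pvFlowerCosts : List Int :=
  (PySem.List.pyRange 0 101 1).map (fun i => (2:Int) ^ i.toNat)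

-- flower_costs[i]; every access has 0 ≤ i < 101, so the `getD 0` default is never taken (exact)
def pvCost (i : Int) : Int := (PySem.List.pyGet? pvFlowerCosts i).getD 0

-- innermost `for k in range(j+1, 101)` with its break
def pvLoopK (budget s2 : Int) (ks : List Int) (ms : Int) (fnd : Bool) : Int × Bool :=
  match ks with
  | [] => (ms, fnd)
  | k :: rest =>
    if s2 + pvCost k > budget then (ms, fnd)
    else pvLoopK budget s2 rest (max ms (s2 + pvCost k)) true

-- `for j in range(i+1, 101)` with its break
def pvLoopJ (budget s1 : Int) (js : List Int) (ms : Int) (fnd : Bool) : Int × Bool :=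
  match js with
  | [] => (ms, fnd)
  | j :: rest =>
    if s1 + pvCost j > budget then (ms, fnd)
    else
      let r := pvLoopK budget (s1 + pvCost j) (PySem.List.pyRange (j+1) 101 1) ms fnd
      pvLoopJ budget s1 rest r.1 r.2

-- `for i in range(len(flower_costs))` with its break
def pvLoopI (budget : Int) (is_ : List Int) (ms : Int) (fnd : Bool) : Int × Bool :=
  match is_ with
  | [] => (ms, fnd)
  | i :: rest =>
    if pvCost i > budget then (ms, fnd)
    else
      let r := pvLoopJ budget (pvCost i) (PySem.List.pyRange (i+1) 101 1) ms fnd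
      pvLoopI budget rest r.1 r.2

def max_bouquet_cost (budgets : List Int) : List Int :=
  budgets.map (fun budget =>
    let r := pvLoopI budget (PySem.List.pyRange 0 101 1) (-1) false
    if r.2 then r.1 else -1)

-- ===== PORT B =====
-- `for e in range(min(100, budget.bit_length()-1), -1, -1)` greedy; 1 << e with e ≥ 0 always, so <<< e.toNat is exact
def pvGreedy (budget : Int) (es : List Int) (total need : Int) : Int × Int :=
  match es with
  | [] => (total, need)
  | e :: rest =>
    if need ≠ 0 ∧ need - 1 ≤ e ∧ total + (1:Int) <<< e.toNat + ((1:Int) <<< (need - 1).toNat - 1) ≤ budget then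
      pvGreedy budget rest (total + (1:Int) <<< e.toNat) (need - 1)
    else
      pvGreedy budget rest total need

def max_bouquet_cost_alt (budgets : List Int) : List Int :=
  budgets.map (fun budget =>
    if budget < 7 then -1
    else
      let r := pvGreedy budget
        (PySem.List.pyRange (min 100 ((PySem.Int.bitLength budget : Int) - 1)) (-1) (-1)) 0 3
      if r.2 == 0 then r.1 else -1)

-- ===== PRECONDITION & SPEC =====
def Spec_max_bouquet_cost (budgets : List Int) (out : List Int) : Prop := out = max_bouquet_cost_alt budgets
instance (budgets : List Int) (out : List Int) : Decidable (Spec_max_bouquet_cost budgets out) := by unfold Spec_max_bouquet_cost; infer_instance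

-- ===== CLAIM (what is proved, stated in full; the proofs are below) =====
def Claim_equal_max_bouquet_cost : Prop := ∀ (budgets : List Int), Dom_max_bouquet_cost budgets → Spec_max_bouquet_cost budgets (max_bouquet_cost budgets)

-- ===== LEMMAS AND PROOFS =====

-- the (filtered) lists of candidate sums A's break-loops effectively maximise over
def pvLK (n s2 b : Int) : List Int :=
  ((PySem.List.pyRange b 101 1).map (fun k => s2 + pvCost k)).filter (fun x => decide (x ≤ n))
def pvLJ (n s1 b : Int) : List Int :=
  (PySem.List.pyRange b 101 1).flatMap (fun j => pvLK n (s1 + pvCost j) (j+1))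
def pvLI (n : Int) : List Int :=
  (PySem.List.pyRange 0 101 1).flatMap (fun i => pvLJ n (pvCost i) (i+1))

-- sums of distinct powers of two, given by a strictly descending exponent list
def pvPowSum (l : List Nat) : Int := (l.map (fun x => (2:Int)^x)).sum
def pvRep (E cnt : Nat) (l : List Nat) : Prop :=
  l.length = cnt ∧ l.Pairwise (· > ·) ∧ ∀ x ∈ l, x ≤ E

theorem pvRangeDescCons (E : Nat) :
    PySem.List.pyRange (E:Int) (-1) (-1) = (E:Int) :: PySem.List.pyRange ((E:Int)-1) (-1) (-1) := by
  have h1 : (-1:Int) < (E:Int) := by omega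
  simp only [PySem.List.pyRange]
  norm_num
  rw [if_pos h1, List.range_succ_eq_map]
  simp only [List.map_cons, List.map_map]
  have hE : (if 0 < E then E else 0) = E := by split <;> omega
  rw [hE]
  refine congrArg₂ _ (by norm_num) ?_
  apply List.map_congr_left; intro k _
  simp [Function.comp]; ring

theorem pvRangeNil (a b : Int) (h : b ≤ a) : PySem.List.pyRange a b 1 = [] := by
  simp only [PySem.List.pyRange]
  norm_num
  omega

theorem pvCost_eq (i : Int) (h0 : 0 ≤ i) (h1 : i < 101) : pvCost i = (2:Int) ^ i.toNat := by
  unfold pvCost pvFlowerCosts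
  have h101 : (101:Int) = ((101:Nat):Int) := by norm_num
  rw [h101, PySem.List.pyRange_zero_natCast]
  obtain ⟨m, rfl⟩ : ∃ m : Nat, i = (m:Int) := ⟨i.toNat, by omega⟩
  rw [PySem.List.pyGet?_natCast]
  simp [(by omega : m < 101)]

theorem pvCost_pos (i : Int) (h0 : 0 ≤ i) (h1 : i < 101) : 0 < pvCost i := by
  rw [pvCost_eq i h0 h1]; positivity

theorem pvCost_mono (a b : Int) (h0 : 0 ≤ a) (hab : a ≤ b) (h1 : b < 101) : pvCost a ≤ pvCost b := by
  rw [pvCost_eq a h0 (by omega), pvCost_eq b (by omega) h1]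
  exact pow_le_pow_right₀ (by norm_num) (by omega)

theorem pvLK_nil (n s2 b : Int) (h : ∀ k : Int, b ≤ k → k < 101 → n < s2 + pvCost k) :
    pvLK n s2 b = [] := by
  unfold pvLK
  rw [List.filter_eq_nil_iff]
  intro x hx
  obtain ⟨k, hk, rfl⟩ := List.mem_map.mp hx
  obtain ⟨hbk, hk101⟩ := PySem.List.mem_pyRange_one.mp hk
  simpa using (h k hbk hk101).not_ge

theorem pvLoopK_spec (n s2 : Int) :
    ∀ (fuel : Nat) (a ms : Int) (fnd : Bool), 0 ≤ a → (101 - a).toNat ≤ fuel →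
      pvLoopK n s2 (PySem.List.pyRange a 101 1) ms fnd
        = (List.foldl max ms (pvLK n s2 a), fnd || !(pvLK n s2 a).isEmpty) := by
  intro fuel
  induction fuel with
  | zero =>
    intro a ms fnd ha hf
    have h : (101:Int) ≤ a := by omega
    unfold pvLK
    rw [pvRangeNil a 101 h]
    simp [pvLoopK]
  | succ f ih =>
    intro a ms fnd ha hf
    by_cases hlt : a < 101
    · by_cases hbr : s2 + pvCost a > n
      · rw [pvLK_nil n s2 a (fun k hk1 hk2 =>
          lt_of_lt_of_le hbr (by have := pvCost_mono a k ha hk1 hk2; omega))]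
        rw [PySem.List.pyRange_one_cons hlt]
        unfold pvLoopK
        rw [if_pos hbr]
        simp
      · have hLK : pvLK n s2 a = (s2 + pvCost a) :: pvLK n s2 (a+1) := by
          unfold pvLK
          rw [PySem.List.pyRange_one_cons hlt]
          simp only [List.map_cons, List.filter_cons]
          rw [if_pos (decide_eq_true (not_lt.mp hbr))]
        rw [PySem.List.pyRange_one_cons hlt]
        unfold pvLoopK
        rw [if_neg hbr, ih (a+1) _ _ (by omega) (by omega), hLK]
        simp
    · have h : (101:Int) ≤ a := by omega
      unfold pvLK
      rw [pvRangeNil a 101 h]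
      simp [pvLoopK]

theorem pvLoopJ_spec (n s1 : Int) :
    ∀ (fuel : Nat) (a ms : Int) (fnd : Bool), 0 ≤ a → (101 - a).toNat ≤ fuel →
      pvLoopJ n s1 (PySem.List.pyRange a 101 1) ms fnd
        = (List.foldl max ms (pvLJ n s1 a), fnd || !(pvLJ n s1 a).isEmpty) := by
  intro fuel
  induction fuel with
  | zero =>
    intro a ms fnd ha hf
    have h : (101:Int) ≤ a := by omega
    unfold pvLJ
    rw [pvRangeNil a 101 h]
    simp [pvLoopJ]
  | succ f ih =>
    intro a ms fnd ha hf
    by_cases hlt : a < 101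
    · by_cases hbr : s1 + pvCost a > n
      · have hnil : pvLJ n s1 a = [] := by
          unfold pvLJ
          rw [List.flatMap_eq_nil_iff]
          intro j hj
          obtain ⟨haj, hj101⟩ := PySem.List.mem_pyRange_one.mp hj
          refine pvLK_nil n (s1 + pvCost j) (j+1) (fun k hk1 hk2 => ?_)
          have h1 := pvCost_mono a j ha haj hj101
          have h2 := pvCost_pos k (by omega) hk2
          omega
        rw [hnil, PySem.List.pyRange_one_cons hlt]
        unfold pvLoopJ
        rw [if_pos hbr]
        simp
      · have hcons : pvLJ n s1 a = pvLK n (s1 + pvCost a) (a+1) ++ pvLJ n s1 (a+1) := by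
          unfold pvLJ
          rw [PySem.List.pyRange_one_cons hlt]
          simp [List.flatMap_cons]
        rw [PySem.List.pyRange_one_cons hlt]
        unfold pvLoopJ
        rw [if_neg hbr]
        simp only []
        rw [pvLoopK_spec n (s1 + pvCost a) (f+1) (a+1) ms fnd (by omega) (by omega)]
        rw [ih (a+1) _ _ (by omega) (by omega), hcons]
        simp only [List.foldl_append, Bool.or_assoc]
        cases h1 : (pvLK n (s1 + pvCost a) (a+1)).isEmpty <;>
          cases h2 : (pvLJ n s1 (a+1)).isEmpty <;>
          simp_all [List.isEmpty_iff]
    · have h : (101:Int) ≤ a := by omega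
      unfold pvLJ
      rw [pvRangeNil a 101 h]
      simp [pvLoopJ]

theorem pvLoopI_spec (n : Int) :
    ∀ (fuel : Nat) (a ms : Int) (fnd : Bool), 0 ≤ a → (101 - a).toNat ≤ fuel →
      pvLoopI n (PySem.List.pyRange a 101 1) ms fnd
        = (List.foldl max ms ((PySem.List.pyRange a 101 1).flatMap (fun i => pvLJ n (pvCost i) (i+1))),
           fnd || !((PySem.List.pyRange a 101 1).flatMap (fun i => pvLJ n (pvCost i) (i+1))).isEmpty) := by
  intro fuel
  induction fuel with
  | zero =>
    intro a ms fnd ha hf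
    have h : (101:Int) ≤ a := by omega
    rw [pvRangeNil a 101 h]
    simp [pvLoopI]
  | succ f ih =>
    intro a ms fnd ha hf
    by_cases hlt : a < 101
    · by_cases hbr : pvCost a > n
      · have hnil : ∀ i : Int, a ≤ i → i < 101 → pvLJ n (pvCost i) (i+1) = [] := by
          intro i hai hi101
          unfold pvLJ
          rw [List.flatMap_eq_nil_iff]
          intro j hj
          obtain ⟨hij, hj101⟩ := PySem.List.mem_pyRange_one.mp hj
          refine pvLK_nil n (pvCost i + pvCost j) (j+1) (fun k hk1 hk2 => ?_)
          have h1 := pvCost_mono a i ha hai hi101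
          have h2 := pvCost_pos j (by omega) hj101
          have h3 := pvCost_pos k (by omega) hk2
          omega
        have hflat : (PySem.List.pyRange a 101 1).flatMap (fun i => pvLJ n (pvCost i) (i+1)) = [] := by
          rw [List.flatMap_eq_nil_iff]
          intro i hi
          obtain ⟨hai, hi101⟩ := PySem.List.mem_pyRange_one.mp hi
          exact hnil i hai hi101
        rw [hflat, PySem.List.pyRange_one_cons hlt]
        unfold pvLoopI
        rw [if_pos hbr]
        simp
      · rw [PySem.List.pyRange_one_cons hlt]
        unfold pvLoopI
        rw [if_neg hbr]
        simp only []
        rw [pvLoopJ_spec n (pvCost a) (f+1) (a+1) ms fnd (by omega) (by omega)]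
        rw [ih (a+1) _ _ (by omega) (by omega)]
        rw [List.flatMap_cons]
        simp only [List.foldl_append, Bool.or_assoc]
        cases h1 : (pvLJ n (pvCost a) (a+1)).isEmpty <;>
          cases h2 : ((PySem.List.pyRange (a+1) 101 1).flatMap (fun i => pvLJ n (pvCost i) (i+1))).isEmpty <;>
          simp_all [List.isEmpty_iff]
    · have h : (101:Int) ≤ a := by omega
      rw [pvRangeNil a 101 h]
      simp [pvLoopI]

-- members of pvLI are exactly the in-budget triple sums
theorem mem_pvLI (n x : Int) :
    x ∈ pvLI n ↔ ∃ i j k : Int, 0 ≤ i ∧ i < j ∧ j < k ∧ k < 101 ∧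
      x = pvCost i + pvCost j + pvCost k ∧ x ≤ n := by
  unfold pvLI pvLJ pvLK
  simp only [List.mem_flatMap, List.mem_filter, List.mem_map, PySem.List.mem_pyRange_one,
    decide_eq_true_eq]
  constructor
  · rintro ⟨i, ⟨hi0, hi101⟩, j, ⟨hij, hj101⟩, ⟨k, ⟨hjk, hk101⟩, rfl⟩, hle⟩
    exact ⟨i, j, k, hi0, by omega, by omega, hk101, by ring, hle⟩
  · rintro ⟨i, j, k, hi0, hij, hjk, hk101, rfl, hle⟩
    exact ⟨i, ⟨hi0, by omega⟩, j, ⟨by omega, by omega⟩, ⟨k, ⟨by omega, hk101⟩, by ring⟩, by linarith⟩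

theorem pvLen_le (t : List Nat) : ∀ x : Nat, t.Pairwise (· > ·) → (∀ z ∈ t, z < x) → t.length ≤ x := by
  induction t with
  | nil => intro x _ _; simp
  | cons y t' ih =>
    intro x hp hb
    obtain ⟨hy', ht'⟩ := List.pairwise_cons.mp hp
    have h1 : t'.length ≤ y := ih y ht' (fun z hz => hy' z hz)
    have h2 : y < x := hb y List.mem_cons_self
    simp only [List.length_cons]
    omega

theorem pvPowSum_min (l : List Nat) (h : l.Pairwise (· > ·)) :
    (2:Int) ^ l.length - 1 ≤ pvPowSum l := by
  induction l with
  | nil => simp [pvPowSum]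
  | cons x t ih =>
    obtain ⟨hx, ht⟩ := List.pairwise_cons.mp h
    have hlen : t.length ≤ x := pvLen_le t x ht (fun z hz => hx z hz)
    have h1 := ih ht
    have h2 : (2:Int) ^ t.length ≤ 2 ^ x := pow_le_pow_right₀ (by norm_num) hlen
    simp only [pvPowSum, List.map_cons, List.sum_cons, List.length_cons]
    have : (2:Int) ^ (t.length + 1) = 2 ^ t.length * 2 := by rw [pow_succ]
    unfold pvPowSum at h1
    omega

theorem pvPowSum_max (l : List Nat) (E : Nat) (h : l.Pairwise (· > ·)) (hE : ∀ x ∈ l, x ≤ E) :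
    pvPowSum l ≤ (2:Int) ^ (E+1) - 1 := by
  induction l generalizing E with
  | nil =>
    simp only [pvPowSum, List.map_nil, List.sum_nil]
    have : (1:Int) ≤ 2 ^ (E+1) := one_le_pow₀ (by norm_num)
    omega
  | cons x t ih =>
    obtain ⟨hx, ht⟩ := List.pairwise_cons.mp h
    have hxE : x ≤ E := hE x List.mem_cons_self
    have h2 : (2:Int) ^ x ≤ 2 ^ E := pow_le_pow_right₀ (by norm_num) hxE
    have h3 : pvPowSum t ≤ (2:Int) ^ x - 1 + 1 - 1 := by
      rcases t with - | ⟨y, t'⟩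
      · simp only [pvPowSum, List.map_nil, List.sum_nil]
        have : (0:Int) < 2 ^ x := by positivity
        omega
      · have hy : y < x := hx y List.mem_cons_self
        have hbnd : ∀ z ∈ y :: t', z ≤ x - 1 := by
          intro z hz
          have := hx z hz
          omega
        have := ih ht (E := x - 1) hbnd
        have hpow : (2:Int) ^ (x - 1 + 1) = 2 ^ x := by
          congr 1
          omega
        rw [hpow] at this
        omega
    have h4 : (2:Int) ^ E ≤ 2 ^ (E+1) - 2 ^ E := by
      have : (2:Int) ^ (E+1) = 2 ^ E * 2 := by rw [pow_succ]
      have : (0:Int) < 2 ^ E := by positivity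
      omega
    simp only [pvPowSum, List.map_cons, List.sum_cons]
    unfold pvPowSum at h3
    have : (2:Int) ^ x ≤ 2 ^ E := h2
    omega

theorem pvRangeDescNilNeg : PySem.List.pyRange (-1) (-1) (-1) = [] := by decide

theorem pvRep_split (E cnt : Nat) (m : List Nat) (h : pvRep (E+1) cnt m) (hmem : (E+1) ∈ m) :
    ∃ m', m = (E+1) :: m' ∧ pvRep E (cnt - 1) m' ∧ pvPowSum m = 2^(E+1) + pvPowSum m' := by
  obtain ⟨hlen, hpair, hbnd⟩ := h
  match m with
  | [] => simp at hmem
  | y :: m' =>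
    obtain ⟨hy, hp'⟩ := List.pairwise_cons.mp hpair
    have hyE : y = E+1 := by
      rcases List.mem_cons.mp hmem with h | h
      · omega
      · have h1 := hy _ h
        have h2 := hbnd y List.mem_cons_self
        omega
    subst hyE
    refine ⟨m', rfl, ⟨by simp at hlen ⊢; omega, hp', fun z hz => by have := hy z hz; omega⟩, ?_⟩
    simp [pvPowSum]

theorem pvRep_lower (E cnt : Nat) (m : List Nat) (h : pvRep (E+1) cnt m) (hmem : (E+1) ∉ m) :
    pvRep E cnt m := by
  refine ⟨h.1, h.2.1, fun x hx => ?_⟩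
  have h1 := h.2.2 x hx
  have h2 : x ≠ E+1 := fun he => hmem (he ▸ hx)
  omega

theorem pvRep_relax (E cnt : Nat) (m : List Nat) (h : pvRep E cnt m) : pvRep (E+1) cnt m :=
  ⟨h.1, h.2.1, fun x hx => by have := h.2.2 x hx; omega⟩

theorem pvShiftOne (k : Nat) : (1:Int) <<< k = 2 ^ k := by
  simp [Int.shiftLeft_eq]

theorem pvGreedy_spec :
    ∀ (E : Nat) (n total need : Int), 0 ≤ need → need ≤ (E:Int) + 1 →
      total + (2:Int) ^ need.toNat - 1 ≤ n →
      ∃ (t : Int) (l : List Nat),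
        pvGreedy n (PySem.List.pyRange (E:Int) (-1) (-1)) total need = (t, 0) ∧
        pvRep E need.toNat l ∧ t = total + pvPowSum l ∧ total ≤ t ∧ t ≤ n ∧
        ∀ m : List Nat, pvRep E need.toNat m → total + pvPowSum m ≤ n → total + pvPowSum m ≤ t := by
  intro E
  induction E with
  | zero =>
    intro n total need h0 h1 h2
    rw [pvRangeDescCons 0]
    have hc : ((0:Nat):Int) - 1 = -1 := by norm_num
    rw [hc, pvRangeDescNilNeg]
    have hcases : need = 0 ∨ need = 1 := by omega
    rcases hcases with rfl | rfl
    · refine ⟨total, [], ?_, ⟨rfl, List.Pairwise.nil, by simp⟩, by simp [pvPowSum], le_refl _, ?_, ?_⟩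
      · unfold pvGreedy
        simp only [pvShiftOne]
        rw [if_neg (by simp)]
        rfl
      · simpa using h2
      · intro m hm _
        have : m = [] := List.length_eq_zero_iff.mp hm.1
        subst this
        simp [pvPowSum]
    · have hcond : (1:Int) ≠ 0 ∧ (1:Int) - 1 ≤ ((0:Nat):Int) ∧
          total + (2:Int) ^ ((0:Nat):Int).toNat + ((2:Int) ^ ((1:Int) - 1).toNat - 1) ≤ n := by
        refine ⟨by norm_num, by norm_num, ?_⟩
        norm_num
        have h21 : (2:Int) ^ (1:Int).toNat = 2 := by norm_num
        rw [h21] at h2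
        omega
      refine ⟨total + 1, [0], ?_, ⟨rfl, List.pairwise_singleton _ _, by simp⟩, by simp [pvPowSum], by omega, ?_, ?_⟩
      · unfold pvGreedy
        simp only [pvShiftOne]
        rw [if_pos hcond]
        norm_num
        rfl
      · have h21 : (2:Int) ^ (1:Int).toNat = 2 := by norm_num
        rw [h21] at h2
        omega
      · intro m hm _
        obtain ⟨hlen, -, hbnd⟩ := hm
        have h1len : m.length = 1 := by simpa using hlen
        match m, h1len with
        | [x], _ =>
          have : x = 0 := by have := hbnd x List.mem_cons_self; omega
          subst this
          simp [pvPowSum]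
  | succ E ih =>
    intro n total need h0 h1 h2
    rw [pvRangeDescCons (E+1)]
    have hc : ((E+1:Nat):Int) - 1 = ((E:Nat):Int) := by push_cast; ring
    rw [hc]
    have hEt : ((E+1:Nat):Int).toNat = E + 1 := by omega
    unfold pvGreedy
    simp only [pvShiftOne]
    by_cases hC : need ≠ 0 ∧ need - 1 ≤ ((E+1:Nat):Int) ∧
        total + (2:Int) ^ ((E+1:Nat):Int).toNat + ((2:Int) ^ (need - 1).toNat - 1) ≤ n
    · rw [if_pos hC]
      obtain ⟨hC1, hC2, hC3⟩ := hC
      have hneed1 : 1 ≤ need := by omega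
      rw [hEt] at hC3 ⊢
      obtain ⟨t, l, hrun, hrep, hteq, htot, htn, hdom⟩ :=
        ih n (total + 2 ^ (E+1)) (need - 1) (by omega) (by omega) (by omega)
      have hPpos : (0:Int) < 2 ^ (E+1) := by positivity
      refine ⟨t, (E+1) :: l, hrun, ?_, ?_, by omega, htn, ?_⟩
      · refine ⟨?_, List.pairwise_cons.mpr ⟨fun y hy => ?_, hrep.2.1⟩, fun x hx => ?_⟩
        · have := hrep.1
          simp only [List.length_cons]
          omega
        · have := hrep.2.2 y hy
          omega
        · rcases List.mem_cons.mp hx with rfl | hx'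
          · omega
          · have := hrep.2.2 x hx'
            omega
      · simp only [pvPowSum, List.map_cons, List.sum_cons]
        unfold pvPowSum at hteq
        omega
      · intro m hm hmn
        by_cases hmem : (E+1) ∈ m
        · obtain ⟨m', rfl, hm', hsum⟩ := pvRep_split E need.toNat m hm hmem
          have hm'' : pvRep E (need - 1).toNat m' := by
            have : need.toNat - 1 = (need - 1).toNat := by omega
            rwa [this] at hm'
          have := hdom m' hm'' (by omega)
          omega
        · have hlow := pvRep_lower E need.toNat m hm hmem
          have hmax := pvPowSum_max m E hlow.2.1 hlow.2.2
          omega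
    · rw [if_neg hC]
      rcases (by omega : need = 0 ∨ 1 ≤ need) with rfl | hneed1
      · obtain ⟨t, l, hrun, hrep, hteq, htot, htn, hdom⟩ :=
          ih n total 0 le_rfl (by omega) h2
        refine ⟨t, l, hrun, pvRep_relax E _ l hrep, hteq, htot, htn, ?_⟩
        intro m hm hmn
        have : m = [] := List.length_eq_zero_iff.mp hm.1
        subst this
        simpa [pvPowSum] using htot
      · have hpow : (2:Int) ^ need.toNat = 2 * 2 ^ (need-1).toNat := by
          rw [show need.toNat = (need-1).toNat + 1 by omega]
          ring
        have hne : need ≤ (E:Int) + 1 := by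
          by_contra hgt
          have heq : need = (E:Int) + 2 := by omega
          apply hC
          refine ⟨by omega, by push_cast; omega, ?_⟩
          rw [hEt]
          have h1' : (need - 1).toNat = E + 1 := by omega
          rw [h1']
          have h2' : need.toNat = E + 2 := by omega
          rw [h2', pow_succ] at h2
          omega
        obtain ⟨t, l, hrun, hrep, hteq, htot, htn, hdom⟩ :=
          ih n total need h0 hne h2
        refine ⟨t, l, hrun, pvRep_relax E _ l hrep, hteq, htot, htn, ?_⟩
        intro m hm hmn
        by_cases hmem : (E+1) ∈ m
        · exfalso
          obtain ⟨m', rfl, hm', hsum⟩ := pvRep_split E need.toNat m hm hmem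
          have hmin : (2:Int) ^ m'.length - 1 ≤ pvPowSum m' := pvPowSum_min m' hm'.2.1
          have hlen' : m'.length = (need - 1).toNat := by
            have := hm'.1
            omega
          rw [hlen'] at hmin
          have hC3' : ¬ (total + (2:Int) ^ ((E+1:Nat):Int).toNat + ((2:Int) ^ (need - 1).toNat - 1) ≤ n) := by
            intro hc3
            exact hC ⟨by omega, by push_cast; omega, hc3⟩
          rw [hEt] at hC3'
          omega
        · exact hdom m (pvRep_lower E need.toNat m hm hmem) hmn

theorem pvFoldlMaxMem (L : List Int) (a : Int) :
    List.foldl max a L = a ∨ List.foldl max a L ∈ L := by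
  induction L generalizing a with
  | nil => exact Or.inl rfl
  | cons y ys ih =>
    simp only [List.foldl_cons]
    rcases ih (max a y) with h | h
    · rcases max_choice a y with hm | hm
      · exact Or.inl (by rw [h, hm])
      · exact Or.inr (by rw [h, hm]; exact List.mem_cons_self)
    · exact Or.inr (List.mem_cons_of_mem y h)

theorem pv_per_budget (n : Int) :
    (let r := pvLoopI n (PySem.List.pyRange 0 101 1) (-1) false
     if r.2 then r.1 else -1)
    = (if n < 7 then -1
       else
         let r := pvGreedy n
           (PySem.List.pyRange (min 100 ((PySem.Int.bitLength n : Int) - 1)) (-1) (-1)) 0 3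
         if r.2 == 0 then r.1 else -1) := by
  have hdef : (PySem.List.pyRange 0 101 1).flatMap (fun i => pvLJ n (pvCost i) (i+1)) = pvLI n := rfl
  have hA := pvLoopI_spec n 101 0 (-1) false le_rfl (by norm_num)
  rw [hdef] at hA
  simp only [hA]
  by_cases hn : 7 ≤ n
  · rw [if_neg (show ¬ (n < 7) by omega)]
    have hbl3 : 3 ≤ PySem.Int.bitLength n := by
      by_contra hlt
      have h1 := PySem.Int.lt_two_pow_bitLength n
      have h2 : (2:Nat) ^ PySem.Int.bitLength n ≤ 2 ^ 2 :=
        Nat.pow_le_pow_right (by norm_num) (by omega)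
      have h3 : (2:Nat) ^ 2 = 4 := by norm_num
      omega
    set EN : Nat := min 100 (PySem.Int.bitLength n - 1) with hEN
    have hEN2 : 2 ≤ EN := by omega
    have hEN100 : EN ≤ 100 := by omega
    have hENcast : ((EN:Nat):Int) = min 100 ((PySem.Int.bitLength n : Int) - 1) := by
      rw [hEN, Nat.cast_min]
      congr 1
      omega
    obtain ⟨t, l, hrun, hrep, hteq, htot, htn, hdom⟩ :=
      pvGreedy_spec EN n 0 3 (by norm_num) (by omega)
        (by have h8 : (2:Int) ^ (3:Int).toNat = 8 := by decide
            omega)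
    rw [hENcast] at hrun
    simp only [hrun]
    norm_num
    -- destructure l = [a, b, c]
    have hlen := hrep.1
    have hlen3 : l.length = 3 := by simpa using hlen
    rcases l with - | ⟨a, - | ⟨b, - | ⟨c, - | ⟨d, l'⟩⟩⟩⟩ <;> simp at hlen3
    obtain ⟨-, hpair, hbnd⟩ := hrep
    simp only [List.pairwise_cons, List.mem_cons] at hpair
    have hab : a > b := hpair.1 b (Or.inl rfl)
    have hac : a > c := hpair.1 c (Or.inr (Or.inl rfl))
    have hbc : b > c := hpair.2.1 c (Or.inl rfl)
    have haEN : a ≤ EN := hbnd a List.mem_cons_self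
    have ha100 : a ≤ 100 := by omega
    have hteq' : t = (2:Int)^a + 2^b + 2^c := by
      simp [pvPowSum] at hteq
      omega
    -- t is a member of pvLI n
    have htmem : t ∈ pvLI n := by
      rw [mem_pvLI]
      refine ⟨(c:Int), (b:Int), (a:Int), by omega, by omega, by omega, by omega, ?_, htn⟩
      rw [pvCost_eq _ (by omega) (by omega), pvCost_eq _ (by omega) (by omega),
        pvCost_eq _ (by omega) (by omega)]
      simp only [Int.toNat_natCast]
      omega
    obtain ⟨hge, hub⟩ := PySem.List.le_foldl_max (pvLI n) (-1)
    have ht_le : t ≤ List.foldl max (-1) (pvLI n) := hub t htmem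
    have hneq : pvLI n ≠ [] := by
      intro h
      rw [h] at htmem
      cases htmem
    rw [if_neg hneq]
    -- the A-side maximum is itself a member (it cannot be -1 since t ≥ 7 ≤ it)
    have ht7 : (7:Int) ≤ t := by
      have h1 : (0:Int) ≤ 2^c := by positivity
      have h2 : (2:Int)^b ≥ 2^c := pow_le_pow_right₀ (by norm_num) (by omega)
      have h3 : (2:Int)^a ≥ 4 := by
        calc (4:Int) = 2^2 := by norm_num
        _ ≤ 2^a := pow_le_pow_right₀ (by norm_num) (by omega)
      have h4 : (1:Int) ≤ 2^c := one_le_pow₀ (by norm_num)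
      have h5 : (2:Int) ≤ 2^b := by
        calc (2:Int) = 2^1 := by norm_num
        _ ≤ 2^b := pow_le_pow_right₀ (by norm_num) (by omega)
      omega
    rcases pvFoldlMaxMem (pvLI n) (-1) with hmax | hmax
    · omega
    · obtain ⟨i, j, k, hi0, hij, hjk, hk101, hxeq, hxle⟩ := (mem_pvLI n _).mp hmax
      have hxle' : List.foldl max (-1) (pvLI n) ≤ t := by
        have hkEN : k.toNat ≤ EN := by
          have hip := pvCost_pos i hi0 (by omega)
          have hjp := pvCost_pos j (by omega) (by omega)
          have hkeq := pvCost_eq k (by omega) hk101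
          have hkx : (2:Int) ^ k.toNat ≤ n := by omega
          have hc : ((2 ^ k.toNat : Nat) : Int) = (2:Int) ^ k.toNat := by norm_num
          have h1 := PySem.Int.lt_two_pow_bitLength n
          have h2 : (2:Nat) ^ k.toNat < 2 ^ PySem.Int.bitLength n := by omega
          have h3 : k.toNat < PySem.Int.bitLength n :=
            (Nat.pow_lt_pow_iff_right (by norm_num)).mp h2
          omega
        have hrep' : pvRep EN (3:Int).toNat [k.toNat, j.toNat, i.toNat] := by
          have hp : [k.toNat, j.toNat, i.toNat].Pairwise (· > ·) := by
            refine List.Pairwise.cons ?_ (List.Pairwise.cons ?_ (List.Pairwise.cons ?_ List.Pairwise.nil))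
            · intro z hz
              rcases List.mem_cons.mp hz with rfl | hz'
              · omega
              · rcases List.mem_cons.mp hz' with rfl | hz''
                · omega
                · cases hz''
            · intro z hz
              rcases List.mem_cons.mp hz with rfl | hz'
              · omega
              · cases hz'
            · intro z hz
              cases hz
          have hb : ∀ z ∈ [k.toNat, j.toNat, i.toNat], z ≤ EN := by
            intro z hz
            rcases List.mem_cons.mp hz with rfl | hz'
            · omega
            · rcases List.mem_cons.mp hz' with rfl | hz''
              · omega
              · rcases List.mem_cons.mp hz'' with rfl | h3
                · omega
                · cases h3
          exact ⟨rfl, hp, hb⟩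
        have hps : pvPowSum [k.toNat, j.toNat, i.toNat] = List.foldl max (-1) (pvLI n) := by
          simp only [pvPowSum, List.map_cons, List.map_nil, List.sum_cons, List.sum_nil]
          rw [hxeq, pvCost_eq _ hi0 (by omega), pvCost_eq _ (by omega) (by omega),
            pvCost_eq _ (by omega) hk101]
          ring
        have := hdom [k.toNat, j.toNat, i.toNat] hrep' (by rw [hps]; omega)
        omega
      omega
  · -- n < 7 : no triple fits, both sides return -1
    rw [if_pos (show n < 7 by omega)]
    have hLnil : pvLI n = [] := by
      rcases h : pvLI n with - | ⟨y, ys⟩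
      · rfl
      · exfalso
        have hy : y ∈ pvLI n := by rw [h]; exact List.mem_cons_self
        obtain ⟨i, j, k, hi0, hij, hjk, hk101, hxeq, hxle⟩ := (mem_pvLI n y).mp hy
        have h1 : (1:Int) ≤ pvCost i := by
          rw [pvCost_eq _ hi0 (by omega)]
          exact one_le_pow₀ (by norm_num)
        have h2 : (2:Int) ≤ pvCost j := by
          rw [pvCost_eq _ (by omega) (by omega)]
          calc (2:Int) = 2^1 := by norm_num
          _ ≤ 2 ^ j.toNat := pow_le_pow_right₀ (by norm_num) (by omega)
        have h3 : (4:Int) ≤ pvCost k := by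
          rw [pvCost_eq _ (by omega) hk101]
          calc (4:Int) = 2^2 := by norm_num
          _ ≤ 2 ^ k.toNat := pow_le_pow_right₀ (by norm_num) (by omega)
        omega
    rw [hLnil]
    norm_num

-- ===== VERDICT (by name: the statement is the Claim_ definition above) =====
theorem max_bouquet_cost_spec : Claim_equal_max_bouquet_cost := by
  intro budgets _
  unfold Spec_max_bouquet_cost max_bouquet_cost max_bouquet_cost_alt
  exact List.map_congr_left (fun n _ => pv_per_budget n)
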